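-- pv_equiv track=rewrite | github.com/SSAFY-6th-SEOUL3/algorithm_study | programmers/빛의 경로 사이클/by-gramm/s1.py | solution
-- ===== SOURCE A (Python) =====
-- dr = [-1, 0, 1, 0]
--
-- dc = [0, 1, 0, -1]
--
-- def solution(grid):
--     r_len, c_len = len(grid), len(grid[0])
--     visited = [[[False] * 4 for _ in range(c_len)] for _ in range(r_len)]
--     distances = []
--
--     for r in range(r_len):
--         for c in range(c_len):
--             for z in range(4):
--                 # (r, c)에서 z 방향으로 가는 사이클이 없었다면
--                 if not visited[r][c][z]:
--                     # 해당 경로를 포함하는 사이클을 탐색한다.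
--                     nr, nc = r, c
--                     visited[nr][nc][z] = True
--                     distance, i = 0, z
--
--                     while True:
--                         # 위치를 업데이트한다.
--                         nr, nc = (nr + dr[i]) % r_len, (nc + dc[i]) % c_len
--                         # 거리와 방향을 업데이트한다.
--                         distance += 1
--                         if grid[nr][nc] == 'L':
--                             i = (i - 1) % 4
--                         elif grid[nr][nc] == 'R':
--                             i = (i + 1) % 4
--
--                         # 해당 위치와 방향에 해당하는 경로를 이미 지났다면
--                         if visited[nr][nc][i]:
--                             # 사이클의 길이를 저장한 뒤, 탐색을 종료한다.
--                             distances.append(distance)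
--                             break
--
--                         visited[nr][nc][i] = True
--
--     # 거리를 오름차순한 결과를 리턴한다.
--     return sorted(distances)
-- ===== SOURCE B (Python) =====
-- dr = [-1, 0, 1, 0]
--
-- dc = [0, 1, 0, -1]
--
-- def solution(grid):
--     r_len, c_len = len(grid), len(grid[0])
--     n = r_len * c_len * 4
--
--     # successor of a state id in the light-path permutation of all (row, col, dir) states
--     def nxt(sid):
--         r, c, d = sid // (4 * c_len), sid // 4 % c_len, sid % 4
--         nr, nc = (r + dr[d]) % r_len, (c + dc[d]) % c_len
--         ch = grid[nr][nc]
--         if ch == 'L':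
--             d = (d + 3) % 4
--         elif ch == 'R':
--             d = (d + 1) % 4
--         return (nr * c_len + nc) * 4 + d
--
--     # memoryless minimum-representative cycle counting: the transition is a
--     # permutation, so each cycle is counted exactly once, at its smallest state id,
--     # by walking while ids stay larger than the start.
--     lengths = []
--     for s in range(n):
--         t, cnt = nxt(s), 1
--         while t > s:
--             t, cnt = nxt(t), cnt + 1
--         if t == s:
--             lengths.append(cnt)
--     return sorted(lengths)
-- ===== Notes on version B (the rewrite author's own statement) =====
-- stated objective: alternative
-- what changed: B drops A's 3D visited array and trace entirely: it flattens states to ids, treats the move-and-turn map as a permutation, and counts each cycle once at its minimum id by the memoryless minimum-representative walk (follow successors while they stay larger than the start).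
import Mathlib
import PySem

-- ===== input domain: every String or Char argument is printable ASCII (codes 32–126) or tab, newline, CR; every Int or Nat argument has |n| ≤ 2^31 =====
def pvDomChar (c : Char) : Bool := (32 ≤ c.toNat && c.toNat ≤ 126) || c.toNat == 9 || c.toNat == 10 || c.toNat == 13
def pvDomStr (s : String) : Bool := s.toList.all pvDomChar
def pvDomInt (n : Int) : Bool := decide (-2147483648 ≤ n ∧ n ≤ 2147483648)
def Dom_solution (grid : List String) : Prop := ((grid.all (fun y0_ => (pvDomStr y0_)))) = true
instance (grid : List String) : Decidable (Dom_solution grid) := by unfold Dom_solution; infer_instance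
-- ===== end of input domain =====

-- B replaces A's visited-array cycle tracing by the memoryless minimum-representative
-- method over flattened state ids: the transition is a permutation, so each cycle is
-- counted exactly once, at its smallest state id (objective: alternative, no extra memory).

-- ===== PORT A =====
def pvDr : List Int := [-1, 0, 1, 0]
def pvDc : List Int := [0, 1, 0, -1]

-- visited[r][c][z] (indices produced by '%' of a positive length, hence non-negative and in range)
def pvGet3 (v : List (List (List Bool))) (r c z : Int) : Bool :=
  PySem.List.pyGetD (PySem.List.pyGetD (PySem.List.pyGetD v r []) c []) z false

-- Python 'visited[r][c][z] = True'; exact here because the indices are non-negative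
def pvSet3 (v : List (List (List Bool))) (r c z : Int) (b : Bool) : List (List (List Bool)) :=
  v.modify r.toNat (fun row => row.modify c.toNat (fun cell => cell.modify z.toNat (fun _ => b)))

-- the 'while True' trace; fuel is only a totality guard (never exhausted on Pre_ inputs),
-- 'none' marks the unreachable fuel-out case, 'some d' the appended cycle length
def pvLoopA (grid : List String) (rl cl : Int) :
    List (List (List Bool)) → Int → Int → Int → Int → Nat →
    (List (List (List Bool)) × Option Int)
  | v, _, _, _, _, 0 => (v, none)
  | v, nr, nc, i, dist, fuel+1 =>
    let nr' := PySem.Int.mod (nr + PySem.List.pyGetD pvDr i 0) rl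
    let nc' := PySem.Int.mod (nc + PySem.List.pyGetD pvDc i 0) cl
    let dist' := dist + 1
    let ch := PySem.List.pyGetD (PySem.List.pyGetD grid nr' "").toList nc' ' '
    let i' := if ch = 'L' then PySem.Int.mod (i - 1) 4
              else if ch = 'R' then PySem.Int.mod (i + 1) 4 else i
    if pvGet3 v nr' nc' i' then (v, some dist')
    else pvLoopA grid rl cl (pvSet3 v nr' nc' i' true) nr' nc' i' dist' fuel

def solution (grid : List String) : List Int :=
  let r_len : Int := grid.length
  let c_len : Int := PySem.Str.len (PySem.List.pyGetD grid 0 "")  -- grid[0]; Pre_ excludes [], where Python raises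
  let visited0 := List.replicate r_len.toNat (List.replicate c_len.toNat (List.replicate 4 false))
  let fuel := r_len.toNat * c_len.toNat * 4
  let st := (PySem.List.pyRange 0 r_len).foldl (fun st r =>
    (PySem.List.pyRange 0 c_len).foldl (fun st c =>
      (PySem.List.pyRange 0 4).foldl (fun st z =>
        if ! pvGet3 st.1 r c z then
          match pvLoopA grid r_len c_len (pvSet3 st.1 r c z true) r c z 0 fuel with
          | (v', some d) => (v', st.2 ++ [d])
          | (v', none) => (v', st.2)
        else st) st) st) (visited0, ([] : List Int))
  PySem.List.sorted st.2 (fun x => x)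

-- ===== PORT B =====
def pvDrB : List Int := [-1, 0, 1, 0]
def pvDcB : List Int := [0, 1, 0, -1]

-- successor of a state id in the light-path permutation of all (row, col, dir) states
def pvNxtId (grid : List String) (rl cl : Int) (sid : Int) : Int :=
  let r := PySem.Int.floordiv sid (4 * cl)
  let c := PySem.Int.mod (PySem.Int.floordiv sid 4) cl
  let d := PySem.Int.mod sid 4
  let nr := PySem.Int.mod (r + PySem.List.pyGetD pvDrB d 0) rl
  let nc := PySem.Int.mod (c + PySem.List.pyGetD pvDcB d 0) cl
  let ch := PySem.List.pyGetD (PySem.List.pyGetD grid nr "").toList nc ' '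
  let nd := if ch = 'L' then PySem.Int.mod (d + 3) 4
            else if ch = 'R' then PySem.Int.mod (d + 1) 4 else d
  (nr * cl + nc) * 4 + nd

-- the 'while t > s' walk; fuel is only a totality guard (never exhausted on Pre_ inputs)
def pvWalkB (grid : List String) (rl cl : Int) : Int → Int → Int → Nat → Option (Int × Int)
  | _, _, _, 0 => none
  | s, t, cnt, f+1 =>
    if s < t then pvWalkB grid rl cl s (pvNxtId grid rl cl t) (cnt + 1) f
    else some (t, cnt)

def solution_alt (grid : List String) : List Int :=
  let r_len : Int := grid.length
  let c_len : Int := PySem.Str.len (PySem.List.pyGetD grid 0 "")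
  let n : Int := r_len * c_len * 4
  let fuel := n.toNat + 1
  let lengths := (PySem.List.pyRange 0 n).foldl (fun acc s =>
    match pvWalkB grid r_len c_len s (pvNxtId grid r_len c_len s) 1 fuel with
    | some (t, cnt) => if t = s then acc ++ [cnt] else acc
    | none => acc) []
  PySem.List.sorted lengths (fun x => x)

-- ===== PRECONDITION & SPEC =====
-- Pre_ excludes exactly the inputs where Python A raises: the empty grid (grid[0] is an
-- IndexError) and grids with a row shorter than the first row (grid[nr][nc] hits an IndexError).
def Pre_solution (grid : List String) : Prop :=
  grid ≠ [] ∧ ∀ s ∈ grid, PySem.Str.len (PySem.List.pyGetD grid 0 "") ≤ PySem.Str.len s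
instance (grid : List String) : Decidable (Pre_solution grid) := by unfold Pre_solution; infer_instance

def pvWitness_solution : List String := ["SL", "LR"]

def Spec_solution (grid : List String) (out : List Int) : Prop := out = solution_alt grid
instance (grid : List String) (out : List Int) : Decidable (Spec_solution grid out) := by unfold Spec_solution; infer_instance

-- ===== CLAIM (what is proved, stated in full; the proofs are below) =====
def Claim_equal_solution : Prop := ∀ (grid : List String), Dom_solution grid → Pre_solution grid → Spec_solution grid (solution grid)

-- ===== LEMMAS AND PROOFS =====

-- valid (in-range) states and their flattened encoding
def pvValid (rl cl : Int) (s : Int × Int × Int) : Prop :=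
  0 ≤ s.1 ∧ s.1 < rl ∧ 0 ≤ s.2.1 ∧ s.2.1 < cl ∧ 0 ≤ s.2.2 ∧ s.2.2 < 4

def pvEnc (cl : Int) (s : Int × Int × Int) : Int := (s.1 * cl + s.2.1) * 4 + s.2.2

-- the one-step transition on state triples (proof-side mirror of both inner updates)
def pvStep (grid : List String) (rl cl : Int) (s : Int × Int × Int) : Int × Int × Int :=
  let nr := PySem.Int.mod (s.1 + PySem.List.pyGetD pvDrB s.2.2 0) rl
  let nc := PySem.Int.mod (s.2.1 + PySem.List.pyGetD pvDcB s.2.2 0) cl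
  let ch := PySem.List.pyGetD (PySem.List.pyGetD grid nr "").toList nc ' '
  let nd := if ch = 'L' then PySem.Int.mod (s.2.2 + 3) 4
            else if ch = 'R' then PySem.Int.mod (s.2.2 + 1) 4 else s.2.2
  (nr, nc, nd)

def pvStates (rl cl : Int) : List (Int × Int × Int) :=
  (PySem.List.pyRange 0 rl).flatMap fun r =>
    (PySem.List.pyRange 0 cl).flatMap fun c =>
      (PySem.List.pyRange 0 4).map fun d => (r, c, d)

def pvShape (rl cl : Nat) (v : List (List (List Bool))) : Prop :=
  v.length = rl ∧ ∀ r : Nat, r < rl →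
    ((v[r]?.getD []).length = cl ∧ ∀ c : Nat, c < cl →
      (((v[r]?.getD [])[c]?.getD []).length = 4))

theorem pv_mem_states {rl cl : Int} {s : Int × Int × Int} :
    s ∈ pvStates rl cl ↔ pvValid rl cl s := by
  obtain ⟨r, c, d⟩ := s
  simp only [pvStates, pvValid, List.mem_flatMap, List.mem_map, PySem.List.mem_pyRange_one]
  constructor
  · rintro ⟨r', hr, c', hc, d', hd, h⟩
    cases h
    exact ⟨hr.1, hr.2, hc.1, hc.2, hd.1, hd.2⟩
  · rintro ⟨h1, h2, h3, h4, h5, h6⟩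
    exact ⟨r, ⟨h1, h2⟩, c, ⟨h3, h4⟩, d, ⟨h5, h6⟩, rfl⟩

theorem pv_step_valid {grid : List String} {rl cl : Int} {s : Int × Int × Int}
    (h : pvValid rl cl s) : pvValid rl cl (pvStep grid rl cl s) := by
  obtain ⟨h1, h2, h3, h4, h5, h6⟩ := h
  have hr : (0:Int) < rl := by omega
  have hc : (0:Int) < cl := by omega
  refine ⟨PySem.Int.mod_nonneg _ hr, PySem.Int.mod_lt _ hr,
    PySem.Int.mod_nonneg _ hc, PySem.Int.mod_lt _ hc, ?_, ?_⟩ <;>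
  · simp only [pvStep]
    split_ifs <;>
      first
        | exact PySem.Int.mod_nonneg _ (by norm_num)
        | exact PySem.Int.mod_lt _ (by norm_num)
        | omega

-- encoding: bounds, injectivity, and commutation with the step
theorem pv_enc_bounds {rl cl : Int} {s : Int × Int × Int} (h : pvValid rl cl s) :
    0 ≤ pvEnc cl s ∧ pvEnc cl s < rl * cl * 4 := by
  obtain ⟨h1, h2, h3, h4, h5, h6⟩ := h
  unfold pvEnc
  constructor
  · nlinarith
  · nlinarith

theorem pv_mul_add_inj {cl a a' b b' : Int} (hb : 0 ≤ b) (hb2 : b < cl)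
    (hb' : 0 ≤ b') (hb2' : b' < cl) (h : a * cl + b = a' * cl + b') : a = a' ∧ b = b' := by
  rcases lt_trichotomy a a' with hlt | heq | hgt
  · exfalso
    have : (a + 1) * cl ≤ a' * cl := mul_le_mul_of_nonneg_right (by omega) (by omega)
    nlinarith
  · constructor
    · exact heq
    · subst heq; omega
  · exfalso
    have : (a' + 1) * cl ≤ a * cl := mul_le_mul_of_nonneg_right (by omega) (by omega)
    nlinarith

theorem pv_enc_inj {rl cl : Int} {s t : Int × Int × Int} (hs : pvValid rl cl s)
    (ht : pvValid rl cl t) (h : pvEnc cl s = pvEnc cl t) : s = t := by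
  obtain ⟨s1, s2, s3, s4, s5, s6⟩ := hs
  obtain ⟨t1, t2, t3, t4, t5, t6⟩ := ht
  unfold pvEnc at h
  have h1 : s.1 * cl + s.2.1 = t.1 * cl + t.2.1 ∧ s.2.2 = t.2.2 := by
    constructor <;> omega
  have h2 := pv_mul_add_inj s3 s4 t3 t4 h1.1
  rw [Prod.ext_iff, Prod.ext_iff]
  exact ⟨h2.1, h2.2, h1.2⟩

theorem pv_nxtId_enc {grid : List String} {rl cl : Int} {s : Int × Int × Int}
    (h : pvValid rl cl s) : pvNxtId grid rl cl (pvEnc cl s) = pvEnc cl (pvStep grid rl cl s) := by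
  obtain ⟨h1, h2, h3, h4, h5, h6⟩ := h
  have hcl : (0:Int) < cl := by omega
  have e1 : PySem.Int.floordiv ((s.1 * cl + s.2.1) * 4 + s.2.2) (4 * cl) = s.1 := by
    rw [PySem.Int.floordiv_eq_iff_of_pos (by nlinarith)]
    constructor <;> nlinarith
  have e2 : PySem.Int.floordiv ((s.1 * cl + s.2.1) * 4 + s.2.2) 4 = s.1 * cl + s.2.1 := by
    rw [PySem.Int.floordiv_eq_iff_of_pos (by norm_num)]
    constructor <;> nlinarith
  have e3 : PySem.Int.mod ((s.1 * cl + s.2.1) * 4 + s.2.2) 4 = s.2.2 := by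
    rw [PySem.Int.mod_eq_emod_of_pos (by norm_num)]
    generalize s.1 * cl + s.2.1 = u
    omega
  have e4 : PySem.Int.mod (s.1 * cl + s.2.1) cl = s.2.1 := by
    rw [PySem.Int.mod_eq_emod_of_pos hcl, add_comm (s.1 * cl) s.2.1, mul_comm s.1 cl,
      Int.add_mul_emod_self_left]
    exact Int.emod_eq_of_lt h3 h4
  simp only [pvNxtId, pvEnc, pvStep, e1, e2, e3, e4]

-- injectivity of the step on valid states (it is a permutation)
theorem pv_dir_cases {rl cl : Int} {s : Int × Int × Int} (hs : pvValid rl cl s) :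
    s.2.2 = 0 ∨ s.2.2 = 1 ∨ s.2.2 = 2 ∨ s.2.2 = 3 := by
  obtain ⟨_, _, _, _, h5, h6⟩ := hs
  omega

theorem pv_mod_shift_inj {rl x y d : Int} (hrl : 0 < rl) (hx1 : 0 ≤ x) (hx2 : x < rl)
    (hy1 : 0 ≤ y) (hy2 : y < rl) (hd1 : -1 ≤ d) (hd2 : d ≤ 1)
    (h : (x + d) % rl = (y + d) % rl) : x = y := by
  have key : ∀ z : Int, 0 ≤ z → z < rl → (z + d) % rl =
      if z + d < 0 then z + d + rl else if z + d < rl then z + d else z + d - rl := by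
    intro z hz1 hz2
    split_ifs with c1 c2
    · rw [← Int.add_emod_right, Int.emod_eq_of_lt (by omega) (by omega)]
    · rw [Int.emod_eq_of_lt (by omega) (by omega)]
    · rw [← Int.sub_emod_right, Int.emod_eq_of_lt (by omega) (by omega)]
  rw [key x hx1 hx2, key y hy1 hy2] at h
  split_ifs at h <;> omega

theorem pv_step_inj {grid : List String} {rl cl : Int} {s t : Int × Int × Int}
    (hs : pvValid rl cl s) (ht : pvValid rl cl t)
    (h : pvStep grid rl cl s = pvStep grid rl cl t) : s = t := by
  have hds := pv_dir_cases hs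
  have hdt := pv_dir_cases ht
  obtain ⟨s1, s2, s3, s4, s5, s6⟩ := hs
  obtain ⟨t1, t2, t3, t4, t5, t6⟩ := ht
  have hrl : (0:Int) < rl := by omega
  have hcl : (0:Int) < cl := by omega
  simp only [pvStep, Prod.mk.injEq] at h
  obtain ⟨hnr, hnc, hnd⟩ := h
  -- the moved-to cell is the same, so the character read is the same
  rw [hnr, hnc] at hnd
  -- recover equality of directions
  have hd : s.2.2 = t.2.2 := by
    split_ifs at hnd with hL hR
    · rw [PySem.Int.mod_eq_emod_of_pos (by norm_num),
        PySem.Int.mod_eq_emod_of_pos (by norm_num)] at hnd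
      omega
    · rw [PySem.Int.mod_eq_emod_of_pos (by norm_num),
        PySem.Int.mod_eq_emod_of_pos (by norm_num)] at hnd
      omega
    · exact hnd
  -- recover equality of positions
  rw [hd] at hnr hnc
  have g0 : PySem.List.pyGetD pvDrB (0:Int) 0 = -1 := by decide
  have g1 : PySem.List.pyGetD pvDrB (1:Int) 0 = 0 := by decide
  have g2 : PySem.List.pyGetD pvDrB (2:Int) 0 = 1 := by decide
  have g3 : PySem.List.pyGetD pvDrB (3:Int) 0 = 0 := by decide
  have k0 : PySem.List.pyGetD pvDcB (0:Int) 0 = 0 := by decide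
  have k1 : PySem.List.pyGetD pvDcB (1:Int) 0 = 1 := by decide
  have k2 : PySem.List.pyGetD pvDcB (2:Int) 0 = 0 := by decide
  have k3 : PySem.List.pyGetD pvDcB (3:Int) 0 = -1 := by decide
  have hnr' : s.1 = t.1 := by
    rcases hdt with h0 | h0 | h0 | h0 <;>
    · rw [h0] at hnr
      simp only [g0, g1, g2, g3] at hnr
      rw [PySem.Int.mod_eq_emod_of_pos hrl, PySem.Int.mod_eq_emod_of_pos hrl] at hnr
      exact pv_mod_shift_inj hrl s1 s2 t1 t2 (by norm_num) (by norm_num) hnr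
  have hnc' : s.2.1 = t.2.1 := by
    rcases hdt with h0 | h0 | h0 | h0 <;>
    · rw [h0] at hnc
      simp only [k0, k1, k2, k3] at hnc
      rw [PySem.Int.mod_eq_emod_of_pos hcl, PySem.Int.mod_eq_emod_of_pos hcl] at hnc
      exact pv_mod_shift_inj hcl s3 s4 t3 t4 (by norm_num) (by norm_num) hnc
  rw [Prod.ext_iff, Prod.ext_iff]
  exact ⟨hnr', hnc', hd⟩

theorem pv_iter_valid {grid : List String} {rl cl : Int} {s : Int × Int × Int}
    (hs : pvValid rl cl s) (k : Nat) : pvValid rl cl ((pvStep grid rl cl)^[k] s) := by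
  induction k with
  | zero => exact hs
  | succ k ih => rw [Function.iterate_succ_apply']; exact pv_step_valid ih

theorem pv_iter_inj {grid : List String} {rl cl : Int} {s t : Int × Int × Int}
    (hs : pvValid rl cl s) (ht : pvValid rl cl t) (k : Nat)
    (h : (pvStep grid rl cl)^[k] s = (pvStep grid rl cl)^[k] t) : s = t := by
  induction k with
  | zero => exact h
  | succ k ih =>
    apply ih
    rw [Function.iterate_succ_apply', Function.iterate_succ_apply'] at h
    exact pv_step_inj (pv_iter_valid hs k) (pv_iter_valid ht k) h

theorem pv_iter_cancel {grid : List String} {rl cl : Int} {s : Int × Int × Int}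
    (hs : pvValid rl cl s) {i j : Nat} (hij : i ≤ j)
    (h : (pvStep grid rl cl)^[i] s = (pvStep grid rl cl)^[j] s) :
    (pvStep grid rl cl)^[j - i] s = s := by
  apply pv_iter_inj (pv_iter_valid hs (j - i)) hs i
  rw [← Function.iterate_add_apply]
  have : i + (j - i) = j := by omega
  rw [this]
  exact h.symm

theorem pv_exists_period {grid : List String} {rl cl : Int} {s : Int × Int × Int}
    (hs : pvValid rl cl s) : ∃ p, 0 < p ∧ (pvStep grid rl cl)^[p] s = s := by
  have hmap : ∀ k ∈ Finset.range ((rl * cl * 4).toNat + 1),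
      pvEnc cl ((pvStep grid rl cl)^[k] s) ∈ Finset.Ico (0:Int) (rl * cl * 4) := by
    intro k _
    have := pv_enc_bounds (pv_iter_valid (grid := grid) hs k)
    simp only [Finset.mem_Ico]
    exact this
  have hcard : (Finset.Ico (0:Int) (rl * cl * 4)).card <
      (Finset.range ((rl * cl * 4).toNat + 1)).card := by
    simp [Int.card_Ico]
  obtain ⟨i, _, j, _, hne, heq⟩ :=
    Finset.exists_ne_map_eq_of_card_lt_of_maps_to hcard hmap
  have hiter : (pvStep grid rl cl)^[i] s = (pvStep grid rl cl)^[j] s :=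
    pv_enc_inj (pv_iter_valid hs i) (pv_iter_valid hs j) heq
  rcases Nat.lt_or_ge i j with hij | hij
  · exact ⟨j - i, by omega, pv_iter_cancel hs (by omega) hiter⟩
  · have hij' : j < i := by omega
    exact ⟨i - j, by omega, pv_iter_cancel hs (by omega) hiter.symm⟩

-- the period (cycle length) of a state
noncomputable def pvPeriod (grid : List String) (rl cl : Int) (s : Int × Int × Int) : Nat :=
  @dite _ (∃ p, 0 < p ∧ (pvStep grid rl cl)^[p] s = s) (Classical.propDecidable _)
    (fun h => Nat.find h) (fun _ => 1)

theorem pv_period_spec {grid : List String} {rl cl : Int} {s : Int × Int × Int}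
    (hs : pvValid rl cl s) :
    0 < pvPeriod grid rl cl s ∧ (pvStep grid rl cl)^[pvPeriod grid rl cl s] s = s ∧
      ∀ k, 0 < k → k < pvPeriod grid rl cl s → (pvStep grid rl cl)^[k] s ≠ s := by
  have h := pv_exists_period (grid := grid) hs
  unfold pvPeriod
  rw [dif_pos h]

  refine ⟨(Nat.find_spec h).1, (Nat.find_spec h).2, ?_⟩
  intro k hk1 hk2 hk3
  exact Nat.find_min h hk2 ⟨hk1, hk3⟩

theorem pv_iter_mod {grid : List String} {rl cl : Int} {s : Int × Int × Int}
    (hs : pvValid rl cl s) (k : Nat) :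
    (pvStep grid rl cl)^[k] s = (pvStep grid rl cl)^[k % pvPeriod grid rl cl s] s := by
  obtain ⟨hp, hfix, _⟩ := pv_period_spec (grid := grid) hs
  set p := pvPeriod grid rl cl s with hpdef
  have hmul : (pvStep grid rl cl)^[p * (k / p)] s = s := by
    rw [Function.iterate_mul]
    exact Function.iterate_fixed hfix (k / p)
  conv_lhs => rw [← Nat.div_add_mod k p]
  rw [add_comm, Function.iterate_add_apply, hmul]

theorem pv_iter_distinct {grid : List String} {rl cl : Int} {s : Int × Int × Int}
    (hs : pvValid rl cl s) {i j : Nat} (hij : i < j) (hj : j < pvPeriod grid rl cl s) :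
    (pvStep grid rl cl)^[i] s ≠ (pvStep grid rl cl)^[j] s := by
  intro h
  obtain ⟨hp, hfix, hmin⟩ := pv_period_spec (grid := grid) hs
  exact hmin (j - i) (by omega) (by omega) (pv_iter_cancel hs (by omega) h)

theorem pv_period_le {grid : List String} {rl cl : Int} {s : Int × Int × Int}
    (hs : pvValid rl cl s) : pvPeriod grid rl cl s ≤ (rl * cl * 4).toNat := by
  have hinj : Set.InjOn (fun k => pvEnc cl ((pvStep grid rl cl)^[k] s))
      ↑(Finset.range (pvPeriod grid rl cl s)) := by
    intro i hi j hj h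
    simp only [Finset.coe_range, Set.mem_Iio] at hi hj
    by_contra hne
    rcases Nat.lt_or_ge i j with hij | hij
    · exact pv_iter_distinct hs hij hj
        (pv_enc_inj (pv_iter_valid hs i) (pv_iter_valid hs j) h)
    · exact pv_iter_distinct hs (by omega) hi
        (pv_enc_inj (pv_iter_valid hs j) (pv_iter_valid hs i) h.symm)
  have hmap : ∀ k ∈ Finset.range (pvPeriod grid rl cl s),
      pvEnc cl ((pvStep grid rl cl)^[k] s) ∈ Finset.Ico (0:Int) (rl * cl * 4) := by
    intro k _
    have := pv_enc_bounds (pv_iter_valid (grid := grid) hs k)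
    simp only [Finset.mem_Ico]
    exact this
  have := Finset.card_le_card_of_injOn _ hmap hinj
  simpa [Int.card_Ico] using this

-- reachability (same orbit) and the 'some orbit id below m' predicate
def pvReach (grid : List String) (rl cl : Int) (s t : Int × Int × Int) : Prop :=
  ∃ k : Nat, (pvStep grid rl cl)^[k] s = t

def pvOrbLT (grid : List String) (rl cl : Int) (t : Int × Int × Int) (m : Int) : Prop :=
  ∃ k : Nat, pvEnc cl ((pvStep grid rl cl)^[k] t) < m

theorem pv_reach_symm {grid : List String} {rl cl : Int} {s t : Int × Int × Int}
    (hs : pvValid rl cl s) (h : pvReach grid rl cl s t) : pvReach grid rl cl t s := by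
  obtain ⟨k, hk⟩ := h
  obtain ⟨hp, hfix, _⟩ := pv_period_spec (grid := grid) hs
  set p := pvPeriod grid rl cl s with hpdef
  have hle : k ≤ p * (k + 1) := by
    calc k ≤ k + 1 := by omega
    _ ≤ p * (k + 1) := Nat.le_mul_of_pos_left _ hp
  refine ⟨p * (k + 1) - k, ?_⟩
  rw [← hk, ← Function.iterate_add_apply]
  have : p * (k + 1) - k + k = p * (k + 1) := by omega
  rw [this, Function.iterate_mul]
  exact Function.iterate_fixed hfix (k + 1)

theorem pv_orbLT_reach {grid : List String} {rl cl : Int} {s t : Int × Int × Int}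
    (hs : pvValid rl cl s) (h : pvReach grid rl cl s t) (m : Int) :
    (pvOrbLT grid rl cl t m ↔ pvOrbLT grid rl cl s m) := by
  have fwd : ∀ {a b : Int × Int × Int}, pvReach grid rl cl a b →
      pvOrbLT grid rl cl b m → pvOrbLT grid rl cl a m := by
    rintro a b ⟨k, hk⟩ ⟨j, hj⟩
    refine ⟨j + k, ?_⟩
    rwa [Function.iterate_add_apply, hk]
  exact ⟨fwd h, fwd (pv_reach_symm hs h)⟩

theorem pv_orbLT_succ {grid : List String} {rl cl : Int} {s t : Int × Int × Int}
    (hs : pvValid rl cl s) (ht : pvValid rl cl t) :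
    (pvOrbLT grid rl cl t (pvEnc cl s + 1) ↔
      pvOrbLT grid rl cl t (pvEnc cl s) ∨ pvReach grid rl cl t s) := by
  constructor
  · rintro ⟨k, hk⟩
    by_cases hlt : pvEnc cl ((pvStep grid rl cl)^[k] t) < pvEnc cl s
    · exact Or.inl ⟨k, hlt⟩
    · have heq : pvEnc cl ((pvStep grid rl cl)^[k] t) = pvEnc cl s := by omega
      exact Or.inr ⟨k, pv_enc_inj (pv_iter_valid ht k) hs heq⟩
  · rintro (⟨k, hk⟩ | ⟨k, hk⟩)
    · exact ⟨k, by omega⟩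
    · exact ⟨k, by rw [hk]; omega⟩

-- ===== marks (visited array) bookkeeping, as in the A port =====
theorem pv_shape_set3 {rl cl : Nat} {v : List (List (List Bool))} (h : pvShape rl cl v)
    (r c z : Int) (b : Bool) : pvShape rl cl (pvSet3 v r c z b) := by
  obtain ⟨hlen, hrow⟩ := h
  refine ⟨by simp [pvSet3, hlen], ?_⟩
  intro r' hr'
  have hr'' : r' < v.length := by omega
  have hvr : v[r']? = some v[r'] := List.getElem?_eq_getElem hr''
  obtain ⟨hcl, hcell⟩ := hrow r' hr'
  simp only [hvr, Option.getD_some] at hcl hcell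
  simp only [pvSet3, List.getElem?_modify, hvr]
  split_ifs with hre
  · simp only [Option.map_eq_map, Option.map_some, Option.getD_some]
    refine ⟨by simp [hcl], ?_⟩
    intro c' hc'
    have hvc : (v[r'])[c']? = some ((v[r'])[c']'(by omega)) := List.getElem?_eq_getElem (by omega)
    have h4 := hcell c' hc'
    simp only [hvc, Option.getD_some] at h4
    simp only [List.getElem?_modify, hvc, Option.map_eq_map, Option.map_some, Option.getD_some]
    split_ifs with hce
    · simp [List.length_modify, h4]
    · exact h4
  · simp only [Option.map_eq_map, Option.map_some, Option.getD_some]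
    exact ⟨hcl, hcell⟩

theorem pv_get3_eq {rl cl : Int} {v : List (List (List Bool))}
    (h : pvShape rl.toNat cl.toNat v) {t : Int × Int × Int} (ht : pvValid rl cl t) :
    pvGet3 v t.1 t.2.1 t.2.2 =
      (((v[t.1.toNat]?.getD [])[t.2.1.toNat]?.getD [])[t.2.2.toNat]?.getD false) := by
  obtain ⟨h1, h2, h3, h4, h5, h6⟩ := ht
  simp only [pvGet3, PySem.List.pyGetD_of_nonneg _ _ h1]
  rw [PySem.List.pyGetD_of_nonneg _ _ h3, PySem.List.pyGetD_of_nonneg _ _ h5]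
  simp [List.getD_eq_getElem?_getD]

theorem pv_get3_set3 {rl cl : Int} {v : List (List (List Bool))}
    (h : pvShape rl.toNat cl.toNat v) {s t : Int × Int × Int}
    (hs : pvValid rl cl s) (ht : pvValid rl cl t) (b : Bool) :
    pvGet3 (pvSet3 v s.1 s.2.1 s.2.2 b) t.1 t.2.1 t.2.2 =
      if t = s then b else pvGet3 v t.1 t.2.1 t.2.2 := by
  have hsh' := pv_shape_set3 h s.1 s.2.1 s.2.2 b
  rw [pv_get3_eq hsh' ht, pv_get3_eq h ht]
  obtain ⟨hlen, hrow⟩ := h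
  obtain ⟨s1, s2, s3, s4, s5, s6⟩ := hs
  obtain ⟨t1, t2, t3, t4, t5, t6⟩ := ht
  have htr : t.1.toNat < v.length := by omega
  have hvr : v[t.1.toNat]? = some v[t.1.toNat] := List.getElem?_eq_getElem htr
  obtain ⟨hcl, hcell⟩ := hrow t.1.toNat (by omega)
  simp only [hvr, Option.getD_some] at hcl hcell
  have hvc : (v[t.1.toNat])[t.2.1.toNat]? = some ((v[t.1.toNat])[t.2.1.toNat]'(by omega)) :=
    List.getElem?_eq_getElem (by omega)
  have h4' := hcell t.2.1.toNat (by omega)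
  simp only [hvc, Option.getD_some] at h4'
  simp only [pvSet3, List.getElem?_modify, hvr, Option.map_eq_map, Option.map_some,
    Option.getD_some]
  by_cases hr : s.1.toNat = t.1.toNat
  · simp only [hr, if_pos rfl]
    simp only [List.getElem?_modify, hvc, Option.map_eq_map, Option.map_some, Option.getD_some]
    by_cases hc : s.2.1.toNat = t.2.1.toNat
    · simp only [hc, if_pos rfl]
      have hvz : ((v[t.1.toNat])[t.2.1.toNat])[t.2.2.toNat]? =
          some (((v[t.1.toNat])[t.2.1.toNat])[t.2.2.toNat]'(by omega)) :=
        List.getElem?_eq_getElem (by omega)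
      simp only [List.getElem?_modify, hvz, Option.map_eq_map, Option.map_some, Option.getD_some]
      by_cases hz : s.2.2.toNat = t.2.2.toNat
      · have heq : t = s := by
          have e1 : t.1 = s.1 := by omega
          have e2 : t.2.1 = s.2.1 := by omega
          have e3 : t.2.2 = s.2.2 := by omega
          rw [Prod.ext_iff, Prod.ext_iff]; exact ⟨e1, e2, e3⟩
        simp [hz, heq, hr, hc, hvc, hvz, List.getElem?_modify]
      · have hne : ¬ t = s := by intro he; subst he; omega
        simp [hz, hne, hr, hc, hvc, hvz, List.getElem?_modify]
    · have hne : ¬ t = s := by intro he; subst he; omega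
      simp [hc, hne, hvc]
  · have hne : ¬ t = s := by intro he; subst he; omega
    simp [hr, hne, hvr]

theorem pv_shape_init (rl cl : Int) :
    pvShape rl.toNat cl.toNat
      (List.replicate rl.toNat (List.replicate cl.toNat (List.replicate 4 false))) := by
  refine ⟨by simp, ?_⟩
  intro r hr
  refine ⟨by simp [hr], ?_⟩
  intro c hc
  simp [hr, hc]

theorem pv_get3_init {rl cl : Int} {t : Int × Int × Int} (ht : pvValid rl cl t) :
    pvGet3 (List.replicate rl.toNat (List.replicate cl.toNat (List.replicate 4 false)))
      t.1 t.2.1 t.2.2 = false := by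
  rw [pv_get3_eq (pv_shape_init rl cl) ht]
  obtain ⟨h1, h2, h3, h4, h5, h6⟩ := ht
  have hr : t.1.toNat < rl.toNat := by omega
  have hcn : t.2.1.toNat < cl.toNat := by omega
  have hz0 : t.2.2.toNat = 0 ∨ t.2.2.toNat = 1 ∨ t.2.2.toNat = 2 ∨ t.2.2.toNat = 3 := by omega
  rcases hz0 with h | h | h | h <;> simp [hr, hcn, h]

theorem pv_mod4_shift (i : Int) : PySem.Int.mod (i - 1) 4 = PySem.Int.mod (i + 3) 4 := by
  rw [PySem.Int.mod_eq_emod_of_pos (b := 4) (by norm_num),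
      PySem.Int.mod_eq_emod_of_pos (b := 4) (by norm_num)]
  omega

theorem pv_loopA_succ (grid : List String) (rl cl : Int) (v : List (List (List Bool)))
    (s : Int × Int × Int) (d : Int) (f : Nat) :
    pvLoopA grid rl cl v s.1 s.2.1 s.2.2 d (f+1) =
      (if pvGet3 v (pvStep grid rl cl s).1 (pvStep grid rl cl s).2.1 (pvStep grid rl cl s).2.2
       then (v, some (d+1))
       else pvLoopA grid rl cl
          (pvSet3 v (pvStep grid rl cl s).1 (pvStep grid rl cl s).2.1 (pvStep grid rl cl s).2.2 true)
          (pvStep grid rl cl s).1 (pvStep grid rl cl s).2.1 (pvStep grid rl cl s).2.2 (d+1) f) := by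
  simp only [pvLoopA, pvStep, pvDr, pvDrB, pvDc, pvDcB, pv_mod4_shift]
  rfl

-- ===== A's inner trace computes the period and marks the orbit =====
theorem pv_loopA_run (grid : List String) (rl cl : Int) {s : Int × Int × Int}
    (hs : pvValid rl cl s) (P : Int × Int × Int → Prop)
    (hP : ∀ i : Nat, ¬ P ((pvStep grid rl cl)^[i] s)) :
    ∀ fuel j (v : List (List (List Bool))), j < pvPeriod grid rl cl s →
      pvPeriod grid rl cl s ≤ j + fuel →
      pvShape rl.toNat cl.toNat v →
      (∀ t, pvValid rl cl t → (pvGet3 v t.1 t.2.1 t.2.2 = true ↔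
        (P t ∨ ∃ i ≤ j, (pvStep grid rl cl)^[i] s = t))) →
      ∃ v', pvLoopA grid rl cl v ((pvStep grid rl cl)^[j] s).1 ((pvStep grid rl cl)^[j] s).2.1
          ((pvStep grid rl cl)^[j] s).2.2 (j : Int) fuel = (v', some (pvPeriod grid rl cl s : Int)) ∧
        pvShape rl.toNat cl.toNat v' ∧
        (∀ t, pvValid rl cl t → (pvGet3 v' t.1 t.2.1 t.2.2 = true ↔
          (P t ∨ pvReach grid rl cl s t))) := by
  obtain ⟨hppos, hpfix, hpmin⟩ := pv_period_spec (grid := grid) hs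
  intro fuel
  induction fuel with
  | zero => intro j v hj1 hj2 _ _; omega
  | succ f ih =>
    intro j v hj1 hj2 hsh hv
    rw [pv_loopA_succ grid rl cl v ((pvStep grid rl cl)^[j] s) (j : Int) f]
    have hstep : pvStep grid rl cl ((pvStep grid rl cl)^[j] s) = (pvStep grid rl cl)^[j+1] s :=
      (Function.iterate_succ_apply' _ j s).symm
    rw [hstep]
    have hvalu : pvValid rl cl ((pvStep grid rl cl)^[j+1] s) := pv_iter_valid hs (j+1)
    by_cases hb : pvGet3 v ((pvStep grid rl cl)^[j+1] s).1 ((pvStep grid rl cl)^[j+1] s).2.1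
        ((pvStep grid rl cl)^[j+1] s).2.2 = true
    · -- the trace closed: we are back at an already marked state, so j+1 is the period
      rcases (hv _ hvalu).1 hb with hPu | ⟨i, hi, hieq⟩
      · exact absurd hPu (hP (j+1))
      have hjp : j + 1 = pvPeriod grid rl cl s := by
        by_contra hne
        exact pv_iter_distinct hs (show i < j + 1 by omega) (by omega) hieq
      rw [if_pos hb]
      have hcast : ((j : Int) + 1) = (pvPeriod grid rl cl s : Int) := by omega
      rw [hcast]
      refine ⟨v, rfl, hsh, ?_⟩
      intro t ht
      rw [hv t ht]
      constructor
      · rintro (hPt | ⟨i', _, hi'⟩)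
        · exact Or.inl hPt
        · exact Or.inr ⟨i', hi'⟩
      · rintro (hPt | ⟨k, hk⟩)
        · exact Or.inl hPt
        · have hmlt := Nat.mod_lt k hppos
          refine Or.inr ⟨k % pvPeriod grid rl cl s, by omega, ?_⟩
          rw [← pv_iter_mod hs k]
          exact hk
    · -- fresh state: mark it and continue
      have hj3 : j + 1 < pvPeriod grid rl cl s := by
        rcases Nat.lt_or_ge (j+1) (pvPeriod grid rl cl s) with h | h
        · exact h
        · exfalso
          have hjp : j + 1 = pvPeriod grid rl cl s := by omega
          have hret : (pvStep grid rl cl)^[j+1] s = s := by rw [hjp]; exact hpfix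
          exact hb ((hv _ hvalu).2 (Or.inr ⟨0, by omega, by
            simp [Function.iterate_zero_apply, hret]⟩))
      rw [if_neg hb]
      have hcast : ((j : Int) + 1) = (((j+1) : Nat) : Int) := by omega
      rw [hcast]
      apply ih (j+1) _ hj3 (by omega) (pv_shape_set3 hsh _ _ _ _)
      intro t ht
      rw [pv_get3_set3 hsh hvalu ht true]
      by_cases he : t = (pvStep grid rl cl)^[j+1] s
      · simp only [he, if_pos rfl]
        constructor
        · intro _; exact Or.inr ⟨j+1, le_rfl, rfl⟩
        · intro _; rfl
      · rw [if_neg he, hv t ht]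
        constructor
        · rintro (hPt | ⟨i, hi, hieq⟩)
          · exact Or.inl hPt
          · exact Or.inr ⟨i, by omega, hieq⟩
        · rintro (hPt | ⟨i, hi, hieq⟩)
          · exact Or.inl hPt
          · rcases Nat.lt_or_ge i (j+1) with h' | h'
            · exact Or.inr ⟨i, by omega, hieq⟩
            · exfalso
              have : i = j + 1 := by omega
              rw [this] at hieq
              exact he hieq.symm

-- ===== B's walk: returns the period at the orbit minimum, skips otherwise =====
theorem pv_walkB_min (grid : List String) (rl cl : Int) {x : Int × Int × Int}
    (hx : pvValid rl cl x)
    (hmin : ∀ k : Nat, 1 ≤ k → k < pvPeriod grid rl cl x →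
      pvEnc cl x < pvEnc cl ((pvStep grid rl cl)^[k] x)) :
    ∀ fuel j, 1 ≤ j → j ≤ pvPeriod grid rl cl x → pvPeriod grid rl cl x ≤ j + fuel →
      pvWalkB grid rl cl (pvEnc cl x) (pvEnc cl ((pvStep grid rl cl)^[j] x)) (j : Int) (fuel + 1) =
        some (pvEnc cl x, (pvPeriod grid rl cl x : Int)) := by
  obtain ⟨hppos, hpfix, hpmin⟩ := pv_period_spec (grid := grid) hx
  intro fuel
  induction fuel with
  | zero =>
    intro j hj1 hj2 hj3
    have hjp : j = pvPeriod grid rl cl x := by omega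
    rw [hjp, hpfix]
    simp only [pvWalkB]
    rw [if_neg (lt_irrefl (pvEnc cl x))]
  | succ f ih =>
    intro j hj1 hj2 hj3
    rcases eq_or_lt_of_le hj2 with hjp | hjlt
    · rw [hjp, hpfix]
      simp only [pvWalkB]
      rw [if_neg (lt_irrefl (pvEnc cl x))]
    · have hlt := hmin j hj1 hjlt
      simp only [pvWalkB, if_pos hlt]
      rw [pv_nxtId_enc (pv_iter_valid hx j),
        ← Function.iterate_succ_apply' (pvStep grid rl cl) j x]
      have hcast : ((j : Int) + 1) = (((j+1) : Nat) : Int) := by omega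
      rw [hcast]
      exact ih (j+1) (by omega) hjlt (by omega)

theorem pv_walkB_nonmin (grid : List String) (rl cl : Int) {x : Int × Int × Int}
    (hx : pvValid rl cl x) (hlt : pvOrbLT grid rl cl x (pvEnc cl x)) :
    ∀ fuel, (rl * cl * 4).toNat ≤ fuel →
      ∃ t cnt, pvWalkB grid rl cl (pvEnc cl x) (pvEnc cl ((pvStep grid rl cl)^[1] x)) 1 (fuel + 1) =
        some (t, cnt) ∧ t ≠ pvEnc cl x := by
  obtain ⟨hppos, hpfix, hpmin⟩ := pv_period_spec (grid := grid) hx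
  have hQ : ∃ k, 1 ≤ k ∧ k < pvPeriod grid rl cl x ∧
      pvEnc cl ((pvStep grid rl cl)^[k] x) < pvEnc cl x := by
    obtain ⟨k, hk⟩ := hlt
    rw [pv_iter_mod hx k] at hk
    refine ⟨k % pvPeriod grid rl cl x, ?_, Nat.mod_lt _ (by omega), hk⟩
    rcases Nat.eq_zero_or_pos (k % pvPeriod grid rl cl x) with h0 | h0
    · rw [h0] at hk; simp at hk
    · omega
  obtain ⟨k0, ⟨hk01, hk0p, hk0lt⟩, hmin0'⟩ :
      ∃ k, (1 ≤ k ∧ k < pvPeriod grid rl cl x ∧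
          pvEnc cl ((pvStep grid rl cl)^[k] x) < pvEnc cl x) ∧
        ∀ j, j < k → ¬ (1 ≤ j ∧ j < pvPeriod grid rl cl x ∧
          pvEnc cl ((pvStep grid rl cl)^[j] x) < pvEnc cl x) :=
    ⟨Nat.find hQ, Nat.find_spec hQ, fun j hj => Nat.find_min hQ hj⟩
  have hmin0 : ∀ j, j < k0 → 1 ≤ j → j < pvPeriod grid rl cl x →
      pvEnc cl x < pvEnc cl ((pvStep grid rl cl)^[j] x) := by
    intro j hj hj1 hjp
    have hnot := hmin0' j hj
    push_neg at hnot
    have hge := hnot hj1 hjp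
    have hne : (pvStep grid rl cl)^[j] x ≠ x := hpmin j (by omega) hjp
    have : pvEnc cl ((pvStep grid rl cl)^[j] x) ≠ pvEnc cl x := fun he =>
      hne (pv_enc_inj (pv_iter_valid hx j) hx he)
    omega
  have helper : ∀ fuel j, 1 ≤ j → j ≤ k0 → k0 ≤ j + fuel →
      pvWalkB grid rl cl (pvEnc cl x) (pvEnc cl ((pvStep grid rl cl)^[j] x)) (j : Int) (fuel + 1) =
        some (pvEnc cl ((pvStep grid rl cl)^[k0] x), (k0 : Int)) := by
    intro fuel
    induction fuel with
    | zero =>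
      intro j hj1 hj2 hj3
      have hjp : j = k0 := by omega
      rw [hjp]
      simp only [pvWalkB]
      rw [if_neg (show ¬ pvEnc cl x < pvEnc cl ((pvStep grid rl cl)^[k0] x) by omega)]
    | succ f ih =>
      intro j hj1 hj2 hj3
      rcases eq_or_lt_of_le hj2 with hjp | hjlt
      · rw [hjp]
        simp only [pvWalkB]
        rw [if_neg (show ¬ pvEnc cl x < pvEnc cl ((pvStep grid rl cl)^[k0] x) by omega)]
      · have hlt' := hmin0 j hjlt hj1 (by omega)
        simp only [pvWalkB, if_pos hlt']
        rw [pv_nxtId_enc (pv_iter_valid hx j),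
          ← Function.iterate_succ_apply' (pvStep grid rl cl) j x]
        have hcast : ((j : Int) + 1) = (((j+1) : Nat) : Int) := by omega
        rw [hcast]
        exact ih (j+1) (by omega) hjlt (by omega)
  intro fuel hfuel
  have hple := pv_period_le (grid := grid) hx
  have h1 := helper fuel 1 le_rfl hk01 (by omega)
  refine ⟨pvEnc cl ((pvStep grid rl cl)^[k0] x), (k0 : Int), ?_, by omega⟩
  have hone : ((1 : Nat) : Int) = (1 : Int) := by norm_num
  rw [← hone]
  exact h1

-- minimality of x in its orbit, as the negation of pvOrbLT at its own id
theorem pv_min_iff {grid : List String} {rl cl : Int} {x : Int × Int × Int}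
    (hx : pvValid rl cl x) :
    (¬ pvOrbLT grid rl cl x (pvEnc cl x)) ↔
      ∀ k : Nat, 1 ≤ k → k < pvPeriod grid rl cl x →
        pvEnc cl x < pvEnc cl ((pvStep grid rl cl)^[k] x) := by
  obtain ⟨hp, hfix, hmin⟩ := pv_period_spec (grid := grid) hx
  constructor
  · intro hno k hk1 hk2
    have hge : ¬ pvEnc cl ((pvStep grid rl cl)^[k] x) < pvEnc cl x := fun hlt => hno ⟨k, hlt⟩
    have hne : (pvStep grid rl cl)^[k] x ≠ x := hmin k (by omega) hk2
    have : pvEnc cl ((pvStep grid rl cl)^[k] x) ≠ pvEnc cl x := fun he =>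
      hne (pv_enc_inj (pv_iter_valid hx k) hx he)
    omega
  · rintro hminAll ⟨k, hk⟩
    rw [pv_iter_mod hx k] at hk
    rcases Nat.eq_zero_or_pos (k % pvPeriod grid rl cl x) with h0 | h0
    · rw [h0] at hk
      simp at hk
    · have := hminAll (k % pvPeriod grid rl cl x) (by omega)
        (Nat.mod_lt _ (by omega))
      omega

-- ===== the enumeration orders agree: states in lexicographic order ↔ ids 0..n-1 =====
theorem pv_shift_map (c a b : Int) :
    (PySem.List.pyRange a b).map (fun x => c + x) = PySem.List.pyRange (c + a) (c + b) := by
  rw [PySem.List.pyRange_one, PySem.List.pyRange_one]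
  simp only [List.map_map]
  have he : ((c + b) - (c + a)).toNat = (b - a).toNat := by omega
  rw [he]
  congr 1
  funext k
  simp only [Function.comp_apply]
  ring

theorem pv_grid2 : ∀ (n : Nat) (a b : Int), a.toNat ≤ n → 0 ≤ b →
    (PySem.List.pyRange 0 a).flatMap
      (fun i => (PySem.List.pyRange 0 b).map (fun j => i * b + j)) =
      PySem.List.pyRange 0 (a * b) := by
  intro n
  induction n with
  | zero =>
    intro a b ha hb
    have h1 : a ≤ 0 := by omega
    rw [PySem.List.pyRange_one_eq_nil h1,
      PySem.List.pyRange_one_eq_nil (by nlinarith : a * b ≤ 0)]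
    rfl
  | succ n ih =>
    intro a b ha hb
    by_cases h1 : a ≤ 0
    · rw [PySem.List.pyRange_one_eq_nil h1,
        PySem.List.pyRange_one_eq_nil (by nlinarith : a * b ≤ 0)]
      rfl
    · push_neg at h1
      have hsplit : PySem.List.pyRange 0 a = PySem.List.pyRange 0 (a - 1) ++ [a - 1] := by
        have h2 := PySem.List.pyRange_one_succ_right (a := 0) (b := a - 1) (by omega)
        have h3 : a - 1 + 1 = a := by omega
        rw [h3] at h2
        exact h2
      rw [hsplit, List.flatMap_append, ih (a - 1) b (by omega) hb]
      have hmap : [a - 1].flatMap (fun i => (PySem.List.pyRange 0 b).map (fun j => i * b + j)) =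
          (PySem.List.pyRange 0 b).map (fun j => (a - 1) * b + j) := by
        simp [List.flatMap]
      rw [hmap]
      have hshift := pv_shift_map ((a - 1) * b) 0 b
      have hfun : (fun j => (a - 1) * b + j) = (fun x => (a - 1) * b + x) := rfl
      rw [hfun, hshift, add_zero]
      have hab : (a - 1) * b + b = a * b := by ring
      rw [hab]
      exact (PySem.List.pyRange_one_append 0 ((a - 1) * b) (a * b)
        (by nlinarith) (by nlinarith)).symm

theorem pv_map_enc_states (rl cl : Int) (hrl : 0 ≤ rl) (hcl : 0 ≤ cl) :
    (pvStates rl cl).map (pvEnc cl) = PySem.List.pyRange 0 (rl * cl * 4) := by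
  unfold pvStates
  rw [List.map_flatMap]
  have hbody : (fun r => ((PySem.List.pyRange 0 cl).flatMap
        (fun c => (PySem.List.pyRange 0 4).map (fun d => (r, c, d)))).map (pvEnc cl)) =
      (fun r => ((PySem.List.pyRange 0 (cl * 4)).map (fun j => r * (cl * 4) + j))) := by
    funext r
    rw [List.map_flatMap]
    have h1 : (fun c => ((PySem.List.pyRange 0 4).map
          (fun d => ((r, c, d) : Int × Int × Int))).map (pvEnc cl)) =
        (fun c => ((PySem.List.pyRange 0 4).map (fun d => c * 4 + d)).map
          (fun x => r * (cl * 4) + x)) := by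
      funext c
      rw [List.map_map, List.map_map]
      congr 1
      funext d
      simp only [Function.comp_apply, pvEnc]
      ring
    rw [h1, ← List.map_flatMap, pv_grid2 cl.toNat cl 4 le_rfl (by norm_num)]
  rw [hbody, pv_grid2 rl.toNat rl (cl * 4) le_rfl (by positivity)]
  congr 1
  ring

-- ===== the main fold bisimulation =====
theorem pv_main (grid : List String) (rl cl : Int) (fuelA fuelB : Nat)
    (hfa : (rl * cl * 4).toNat ≤ fuelA) (hfb : (rl * cl * 4).toNat + 1 ≤ fuelB) :
    ∀ (l : List (Int × Int × Int)) (v : List (List (List Bool))) (acc : List Int) (m : Int),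
      l.map (pvEnc cl) = PySem.List.pyRange m (rl * cl * 4) →
      (∀ t ∈ l, pvValid rl cl t) →
      pvShape rl.toNat cl.toNat v →
      (∀ t, pvValid rl cl t → (pvGet3 v t.1 t.2.1 t.2.2 = true ↔ pvOrbLT grid rl cl t m)) →
      (l.foldl (fun st s =>
        if ! pvGet3 st.1 s.1 s.2.1 s.2.2 then
          match pvLoopA grid rl cl (pvSet3 st.1 s.1 s.2.1 s.2.2 true) s.1 s.2.1 s.2.2 0 fuelA with
          | (v', some d) => (v', st.2 ++ [d])
          | (v', none) => (v', st.2)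
        else st) (v, acc)).2 =
      l.foldl (fun acc s =>
        match pvWalkB grid rl cl (pvEnc cl s) (pvNxtId grid rl cl (pvEnc cl s)) 1 fuelB with
        | some (t, cnt) => if t = pvEnc cl s then acc ++ [cnt] else acc
        | none => acc) acc := by
  intro l
  induction l with
  | nil => intro v acc m _ _ _ _; rfl
  | cons a l ih =>
    intro v acc m hmap hval hsh hv
    have ha : pvValid rl cl a := hval a List.mem_cons_self
    -- the head of the remaining enumeration is exactly the id m
    have hmN : m < rl * cl * 4 := by
      by_contra hge
      rw [PySem.List.pyRange_one_eq_nil (by omega)] at hmap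
      simp at hmap
    rw [PySem.List.pyRange_one_cons hmN, List.map_cons, List.cons.injEq] at hmap
    obtain ⟨hencA, hmapTl⟩ := hmap
    have hvalTl : ∀ t ∈ l, pvValid rl cl t := fun t ht => hval t (List.mem_cons_of_mem _ ht)
    obtain ⟨hppos, hpfix, hpmin⟩ := pv_period_spec (grid := grid) ha
    simp only [List.foldl_cons]
    by_cases hO : pvOrbLT grid rl cl a (pvEnc cl a)
    · -- a is not the minimum of its cycle: A skips (already visited), B's walk stops below a
      have hOm : pvOrbLT grid rl cl a m := by rw [← hencA]; exact hO
      have hg : pvGet3 v a.1 a.2.1 a.2.2 = true := (hv a ha).2 hOm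
      rw [hg]
      obtain ⟨t, cnt, hwalk, hne⟩ := pv_walkB_nonmin grid rl cl ha hO (fuelB - 1) (by omega)
      have hfb1 : fuelB - 1 + 1 = fuelB := by omega
      rw [hfb1] at hwalk
      have hnxt : pvNxtId grid rl cl (pvEnc cl a) = pvEnc cl ((pvStep grid rl cl)^[1] a) := by
        rw [pv_nxtId_enc ha, Function.iterate_one]
      rw [Bool.not_true, if_neg (by simp), hnxt, hwalk]
      dsimp only
      rw [if_neg hne]
      apply ih v acc (m + 1) hmapTl hvalTl hsh
      intro t ht
      rw [hv t ht, ← hencA, pv_orbLT_succ ha ht]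
      constructor
      · exact Or.inl
      · rintro (h | hreach)
        · exact h
        · rw [← pv_orbLT_reach ht hreach]
          exact hO
    · -- a is the minimum of its cycle: A traces and appends the period, B's walk returns it
      have hOm : ¬ pvOrbLT grid rl cl a m := by rw [← hencA]; exact hO
      have hg : pvGet3 v a.1 a.2.1 a.2.2 = false := by
        cases hb : pvGet3 v a.1 a.2.1 a.2.2
        · rfl
        · exact absurd ((hv a ha).1 hb) hOm
      rw [hg, Bool.not_false, if_pos rfl]
      -- A side: run the trace from a
      have hP : ∀ i : Nat, ¬ pvOrbLT grid rl cl ((pvStep grid rl cl)^[i] a) m := by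
        intro i hcon
        exact hOm ((pv_orbLT_reach ha ⟨i, rfl⟩ m).1 hcon)
      have hrun := pv_loopA_run grid rl cl ha (fun t => pvOrbLT grid rl cl t m) hP fuelA 0
        (pvSet3 v a.1 a.2.1 a.2.2 true) hppos
        (by have := pv_period_le (grid := grid) ha; omega)
        (pv_shape_set3 hsh _ _ _ _) ?_
      · obtain ⟨v', hloop, hsh', hv'⟩ := hrun
        simp only [Function.iterate_zero_apply, Nat.cast_zero] at hloop
        rw [hloop]
        -- B side
        have hmin := (pv_min_iff ha).1 hO
        have hwalk := pv_walkB_min grid rl cl ha hmin (fuelB - 1) 1 le_rfl (by omega)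
          (by have := pv_period_le (grid := grid) ha; omega)
        have hfb1 : fuelB - 1 + 1 = fuelB := by omega
        rw [hfb1, Function.iterate_one, Nat.cast_one] at hwalk
        have hnxt : pvNxtId grid rl cl (pvEnc cl a) = pvEnc cl (pvStep grid rl cl a) :=
          pv_nxtId_enc ha
        rw [hnxt, hwalk]
        dsimp only
        rw [if_pos rfl]
        apply ih v' (acc ++ [(pvPeriod grid rl cl a : Int)]) (m + 1) hmapTl hvalTl hsh'
        intro t ht
        rw [hv' t ht, ← hencA, pv_orbLT_succ ha ht]
        constructor
        · rintro (h | hreach)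
          · exact Or.inl h
          · exact Or.inr (pv_reach_symm ha hreach)
        · rintro (h | hreach)
          · exact Or.inl h
          · exact Or.inr (pv_reach_symm ht hreach)
      · -- the marks after marking a itself
        intro t ht
        rw [pv_get3_set3 hsh ha ht true]
        by_cases he : t = a
        · simp only [he, if_pos rfl]
          constructor
          · intro _
            exact Or.inr ⟨0, le_rfl, by simp⟩
          · intro _; rfl
        · rw [if_neg he, hv t ht]
          constructor
          · exact Or.inl
          · rintro (h | ⟨i, hi, hieq⟩)
            · exact h
            · exfalso
              have : i = 0 := by omega
              rw [this] at hieq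
              simp at hieq
              exact he hieq.symm

theorem pv_nested_eq {σ : Type} (F : σ → Int → Int → Int → σ) (init : σ) (rl cl : Int) :
    (PySem.List.pyRange 0 rl).foldl (fun st r =>
      (PySem.List.pyRange 0 cl).foldl (fun st c =>
        (PySem.List.pyRange 0 4).foldl (fun st z => F st r c z) st) st) init =
    (pvStates rl cl).foldl (fun st s => F st s.1 s.2.1 s.2.2) init := by
  simp [pvStates, List.foldl_flatMap, List.foldl_map]

-- ===== VERDICT (by name: the statement is the Claim_ definition above) =====
theorem solution_spec : Claim_equal_solution := by
  intro grid _ _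
  unfold Spec_solution solution solution_alt
  dsimp only
  rw [pv_nested_eq (σ := List (List (List Bool)) × List Int) (fun st r c z =>
    if ! pvGet3 st.1 r c z then
      match pvLoopA grid (grid.length : Int)
          (PySem.Str.len (PySem.List.pyGetD grid 0 "")) (pvSet3 st.1 r c z true) r c z 0
          ((grid.length : Int).toNat * (PySem.Str.len (PySem.List.pyGetD grid 0 "")).toNat * 4) with
      | (v', some d) => (v', st.2 ++ [d])
      | (v', none) => (v', st.2)
    else st)]
  congr 1
  have hrl0 : (0 : Int) ≤ (grid.length : Int) := Int.natCast_nonneg _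
  have hcl0 : (0 : Int) ≤ PySem.Str.len (PySem.List.pyGetD grid 0 "") := by
    rw [PySem.Str.len_eq]
    exact Int.natCast_nonneg _
  have htoNat : ((grid.length : Int) * PySem.Str.len (PySem.List.pyGetD grid 0 "") * 4).toNat =
      (grid.length : Int).toNat * (PySem.Str.len (PySem.List.pyGetD grid 0 "")).toNat * 4 := by
    have he : (grid.length : Int) * PySem.Str.len (PySem.List.pyGetD grid 0 "") * 4 =
        (((grid.length : Int).toNat * (PySem.Str.len (PySem.List.pyGetD grid 0 "")).toNat * 4
          : Nat) : Int) := by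
      push_cast
      rw [Int.toNat_of_nonneg hrl0, Int.toNat_of_nonneg hcl0]
    rw [he, Int.toNat_natCast]
  rw [← pv_map_enc_states (grid.length : Int) (PySem.Str.len (PySem.List.pyGetD grid 0 ""))
    hrl0 hcl0, List.foldl_map]
  exact pv_main grid (grid.length : Int) (PySem.Str.len (PySem.List.pyGetD grid 0 ""))
    ((grid.length : Int).toNat * (PySem.Str.len (PySem.List.pyGetD grid 0 "")).toNat * 4)
    (((grid.length : Int) * PySem.Str.len (PySem.List.pyGetD grid 0 "") * 4).toNat + 1)
    (le_of_eq htoNat) le_rfl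
    (pvStates _ _) _ [] 0 (pv_map_enc_states _ _ hrl0 hcl0)
    (fun t ht => pv_mem_states.1 ht) (pv_shape_init _ _)
    (by
      intro t ht
      rw [pv_get3_init ht]
      constructor
      · intro h
        simp at h
      · rintro ⟨k, hk⟩
        have := (pv_enc_bounds (pv_iter_valid (grid := grid) ht k)).1
        omega)
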